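-- pv_equiv track=rewrite | github.com/Chiominto/snorlax_bot | utils/cache/pokemon_cache.py | format_display_name_for_autocomplete
-- ===== SOURCE A (Python) =====
-- def format_display_name_for_autocomplete(raw_name: str) -> str:
--     SPECIAL_CASES = {
--         "jangmo-o": "Jangmo-o",
--         "hakamo-o": "Hakamo-o",
--         "kommo-o": "Kommo-o",
--         "tapu-koko": "Tapu-Koko",
--         "tapu-lele": "Tapu-Lele",
--         "tapu-bulu": "Tapu-Bulu",
--         "tapu-fini": "Tapu-Fini",
--     }
--
--     clean_name = raw_name.lower()
--
--     if "mega-" in clean_name: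
--         clean_name = clean_name.replace("mega-", "mega ")
--
--     if clean_name in SPECIAL_CASES:
--         return SPECIAL_CASES[clean_name]
--
--     def smart_capitalize(name: str) -> str:
--         return " ".join(
--             "-".join(sub.capitalize() for sub in part.split("-"))
--             for part in name.split()
--         )
--
--     return smart_capitalize(clean_name)
-- ===== SOURCE B (Python) =====
-- def format_display_name_for_autocomplete(raw_name: str) -> str:
--     SPECIAL_CASES = {
--         "jangmo-o": "Jangmo-o",
--         "hakamo-o": "Hakamo-o",
--         "kommo-o": "Kommo-o",
--         "tapu-koko": "Tapu-Koko",
--         "tapu-lele": "Tapu-Lele",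
--         "tapu-bulu": "Tapu-Bulu",
--         "tapu-fini": "Tapu-Fini",
--     }
--
--     clean_name = raw_name.lower()
--
--     if "mega-" in clean_name:
--         clean_name = clean_name.replace("mega-", "mega ")
--
--     if clean_name in SPECIAL_CASES:
--         return SPECIAL_CASES[clean_name]
--
--     # single left-to-right pass instead of split/join tokenization
--     out = []
--     pending_space = False
--     seen_word = False
--     cap_next = True
--     for ch in clean_name:
--         if ch.isspace():
--             if seen_word:
--                 pending_space = True
--             cap_next = True
--         else:
--             if pending_space:
--                 out.append(" ")
--                 pending_space = False
--             seen_word = True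
--             if ch == "-":
--                 out.append("-")
--                 cap_next = True
--             else:
--                 out.append(ch.upper() if cap_next else ch)
--                 cap_next = False
--     return "".join(out)
-- ===== Notes on version B (the rewrite author's own statement) =====
-- stated objective: alternative
-- what changed: smart_capitalize's nested split/join tokenization is replaced by a single left-to-right pass over the cleaned string that maintains pending-space/seen-word/cap-next flags and capitalizes at each space- or hyphen-delimited segment start.
import Mathlib
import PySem

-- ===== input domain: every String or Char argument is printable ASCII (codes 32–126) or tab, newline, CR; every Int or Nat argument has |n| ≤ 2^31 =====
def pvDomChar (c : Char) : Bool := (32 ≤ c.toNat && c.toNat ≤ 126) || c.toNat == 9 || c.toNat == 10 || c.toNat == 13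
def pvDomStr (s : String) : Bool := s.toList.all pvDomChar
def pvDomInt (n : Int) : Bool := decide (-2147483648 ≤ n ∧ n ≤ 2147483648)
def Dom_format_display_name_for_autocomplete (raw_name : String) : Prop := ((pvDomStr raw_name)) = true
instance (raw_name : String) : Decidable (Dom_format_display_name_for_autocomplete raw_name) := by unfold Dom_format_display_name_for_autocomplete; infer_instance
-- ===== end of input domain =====

-- B replaces A's split/join tokenization in smart_capitalize by a single left-to-right pass
-- with a segment-start flag (objective: alternative decomposition; same cost).

-- ===== PORT A =====

-- the SPECIAL_CASES dict literal (shared constant: both Pythons define the identical literal)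
def pvSpecialCases : PySem.Dict String String :=
  PySem.Dict.ofList
    [("jangmo-o", "Jangmo-o"), ("hakamo-o", "Hakamo-o"), ("kommo-o", "Kommo-o"),
     ("tapu-koko", "Tapu-Koko"), ("tapu-lele", "Tapu-Lele"), ("tapu-bulu", "Tapu-Bulu"),
     ("tapu-fini", "Tapu-Fini")]

-- str.capitalize(): first char titlecased, rest lowered — hand port, exact on the ASCII domain
-- (titlecase coincides with upperChar there)
def pvCap (s : List Char) : List Char :=
  match s with
  | [] => []
  | c :: r => PySem.Chars.upperChar c :: PySem.Chars.lower r

-- the inner helper 'smart_capitalize' of A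
def pvSmartCapitalize (name : List Char) : List Char :=
  PySem.Chars.join [' ']
    ((PySem.Chars.split₀ name).map (fun part =>
      PySem.Chars.join ['-'] ((PySem.Chars.splitOn part ['-']).map pvCap)))

def format_display_name_for_autocomplete (raw_name : String) : String :=
  let clean0 := PySem.Chars.lower raw_name.toList
  let clean := if PySem.Chars.isIn "mega-".toList clean0 = true
               then PySem.Chars.replace clean0 "mega-".toList "mega ".toList
               else clean0
  match pvSpecialCases.get? (String.mk clean) with
  | some v => v
  | none => String.mk (pvSmartCapitalize clean)

-- ===== PORT B =====

-- loop body of B's single pass; state = (out, pending_space, seen_word, cap_next)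
def pvStep : (List Char × Bool × Bool × Bool) → Char → List Char × Bool × Bool × Bool
  | (out, pending, seen, cap), ch =>
    if PySem.Chars.isspace ch = true then
      (out, if seen then true else pending, seen, true)
    else
      let out1 := if pending then out ++ [' '] else out
      if ch = '-' then (out1 ++ ['-'], false, true, true)
      else (out1 ++ [if cap then PySem.Chars.upperChar ch else ch], false, true, false)

def format_display_name_for_autocomplete_alt (raw_name : String) : String :=
  let clean0 := PySem.Chars.lower raw_name.toList
  let clean := if PySem.Chars.isIn "mega-".toList clean0 = true
               then PySem.Chars.replace clean0 "mega-".toList "mega ".toList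
               else clean0
  match pvSpecialCases.get? (String.mk clean) with
  | some v => v
  | none => String.mk ((clean.foldl pvStep ([], false, false, true)).1)

-- ===== PRECONDITION & SPEC =====
def Spec_format_display_name_for_autocomplete (raw_name : String) (out : String) : Prop := out = format_display_name_for_autocomplete_alt raw_name
instance (raw_name : String) (out : String) : Decidable (Spec_format_display_name_for_autocomplete raw_name out) := by unfold Spec_format_display_name_for_autocomplete; infer_instance

-- ===== CLAIM (what is proved, stated in full; the proofs are below) =====
def Claim_equal_format_display_name_for_autocomplete : Prop := ∀ (raw_name : String), Dom_format_display_name_for_autocomplete raw_name → Spec_format_display_name_for_autocomplete raw_name (format_display_name_for_autocomplete raw_name)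

-- ===== LEMMAS AND PROOFS =====

-- proof-only helpers --------------------------------------------------------

-- splitting on the single character '-' (reference form of Chars.splitOn · ['-'])
def pvSplitC : List Char → List (List Char)
  | [] => [[]]
  | c :: r =>
    if c = '-' then [] :: pvSplitC r
    else match pvSplitC r with
         | [] => [[c]]
         | h :: t => (c :: h) :: t

-- what B's pass emits while inside a word (no whitespace), given the cap flag
def pvInWord : List Char → Bool → List Char
  | [], _ => []
  | c :: r, cap =>
    if c = '-' then '-' :: pvInWord r true
    else (if cap then PySem.Chars.upperChar c else c) :: pvInWord r false

-- the cap flag after a word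
def pvCapEnd : List Char → Bool → Bool
  | [], cap => cap
  | c :: r, _ => if c = '-' then pvCapEnd r true else pvCapEnd r false

def pvNWS (c : Char) : Bool := !PySem.Chars.isspace c

-- basic char facts ----------------------------------------------------------

lemma pvLowerChar_idem (c : Char) :
    PySem.Chars.lowerChar (PySem.Chars.lowerChar c) = PySem.Chars.lowerChar c := by
  unfold PySem.Chars.lowerChar PySem.Chars.isupper
  split_ifs with h1 h2 <;> try rfl
  exfalso
  simp only [Bool.and_eq_true, decide_eq_true_eq] at h1 h2
  obtain ⟨a1, a2⟩ := h1
  obtain ⟨b1, b2⟩ := h2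
  have ha1 : 65 ≤ c.toNat := a1
  have ha2 : c.toNat ≤ 90 := a2
  have hv : Nat.isValidChar (c.toNat + 32) := Or.inl (by omega)
  have ht : (Char.ofNat (c.toNat + 32)).toNat = c.toNat + 32 := by
    rw [Char.toNat_ofNat, if_pos hv]
  have hb1 : 65 ≤ (Char.ofNat (c.toNat + 32)).toNat := b1
  have hb2 : (Char.ofNat (c.toNat + 32)).toNat ≤ 90 := b2
  omega

lemma pvMem_lower {c : Char} {l : List Char} (h : c ∈ PySem.Chars.lower l) :
    PySem.Chars.lowerChar c = c := by
  simp only [PySem.Chars.lower, List.mem_map] at h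
  obtain ⟨d, _, rfl⟩ := h
  exact pvLowerChar_idem d

lemma pvLower_eq_self {l : List Char} (h : ∀ c ∈ l, PySem.Chars.lowerChar c = c) :
    PySem.Chars.lower l = l := by
  simp only [PySem.Chars.lower]
  exact (List.map_congr_left h).trans (List.map_id _)

-- replace only emits characters of the source or of the replacement ---------

lemma pvMem_replace_go {c : Char} (old new : List Char) :
    ∀ fuel l acc, c ∈ PySem.Chars.replace.go old new fuel l acc →
      c ∈ acc ∨ c ∈ l ∨ c ∈ new := by
  intro fuel
  induction fuel with
  | zero =>
    intro l acc h
    simp only [PySem.Chars.replace.go, List.mem_append, List.mem_reverse] at h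
    tauto
  | succ n ih =>
    intro l acc h
    cases l with
    | nil =>
      simp only [PySem.Chars.replace.go, List.mem_reverse] at h
      tauto
    | cons d t =>
      simp only [PySem.Chars.replace.go] at h
      split at h
      · rcases ih _ _ h with h' | h' | h'
        · simp only [List.mem_append, List.mem_reverse] at h'
          tauto
        · exact Or.inr (Or.inl (List.mem_of_mem_drop h'))
        · tauto
      · rcases ih _ _ h with h' | h' | h'
        · simp only [List.mem_cons] at h'
          rcases h' with rfl | h' <;> simp_all
        · simp_all
        · tauto

lemma pvMem_replace {c : Char} {s old new : List Char}
    (h : c ∈ PySem.Chars.replace s old new) : c ∈ s ∨ c ∈ new := by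
  unfold PySem.Chars.replace at h
  split at h
  · simp only [List.mem_append, List.mem_flatMap, List.mem_cons] at h
    rcases h with h | ⟨a, ha, rfl | h⟩
    · exact Or.inr h
    · exact Or.inl ha
    · exact Or.inr h
  · rcases pvMem_replace_go old new _ _ _ h with h' | h' | h' <;> simp_all

-- split₀ structure ----------------------------------------------------------

lemma pvSplit0_go_acc (s : List Char) :
    ∀ cur acc, PySem.Chars.split₀.go s cur acc =
      acc.reverse ++ PySem.Chars.split₀.go s cur [] := by
  induction s with
  | nil =>
    intro cur acc
    simp only [PySem.Chars.split₀.go]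
    split <;> simp
  | cons c r ih =>
    intro cur acc
    simp only [PySem.Chars.split₀.go]
    split
    · split
      · exact ih _ _
      · rw [ih _ (cur.reverse :: acc), ih _ [cur.reverse]]
        simp
    · exact ih _ _

lemma pvSplit0_ws {c : Char} (hc : PySem.Chars.isspace c = true) (s : List Char) :
    PySem.Chars.split₀ (c :: s) = PySem.Chars.split₀ s := by
  simp [PySem.Chars.split₀, PySem.Chars.split₀.go, hc]

lemma pvSplit0_go_word (s : List Char) :
    ∀ cur, cur ≠ [] → PySem.Chars.split₀.go s cur [] =
      (cur.reverse ++ s.takeWhile pvNWS) :: PySem.Chars.split₀ (s.dropWhile pvNWS) := by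
  induction s with
  | nil =>
    intro cur hcur
    simp [PySem.Chars.split₀.go, PySem.Chars.split₀, hcur]
  | cons c r ih =>
    intro cur hcur
    by_cases hc : PySem.Chars.isspace c = true
    · have h1 : PySem.Chars.split₀.go (c :: r) cur [] =
          [cur.reverse] ++ PySem.Chars.split₀.go r [] [] := by
        simp only [PySem.Chars.split₀.go, hc, if_pos]
        rw [if_neg (by simp [hcur]), pvSplit0_go_acc]
        rfl
      have h2 : List.takeWhile pvNWS (c :: r) = [] := by
        simp [List.takeWhile_cons, pvNWS, hc]
      have h3 : List.dropWhile pvNWS (c :: r) = c :: r := by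
        simp [List.dropWhile_cons, pvNWS, hc]
      rw [h1, h2, h3, pvSplit0_ws hc]
      simp [PySem.Chars.split₀]
    · have hcf : PySem.Chars.isspace c = false := by simpa using hc
      have h1 : PySem.Chars.split₀.go (c :: r) cur [] =
          PySem.Chars.split₀.go r (c :: cur) [] := by
        simp [PySem.Chars.split₀.go, hcf]
      rw [h1, ih (c :: cur) (by simp)]
      simp [pvNWS, hcf, List.takeWhile_cons, List.dropWhile_cons]

lemma pvSplit0_nws {c : Char} (hc : PySem.Chars.isspace c = false) (s : List Char) :
    PySem.Chars.split₀ (c :: s) =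
      (c :: s.takeWhile pvNWS) :: PySem.Chars.split₀ (s.dropWhile pvNWS) := by
  show PySem.Chars.split₀.go (c :: s) [] [] = _
  have h1 : PySem.Chars.split₀.go (c :: s) [] [] = PySem.Chars.split₀.go s [c] [] := by
    simp [PySem.Chars.split₀.go, hc]
  rw [h1, pvSplit0_go_word s [c] (by simp)]
  simp

-- splitOn on "-" equals pvSplitC --------------------------------------------

lemma pvSplitC_ne_nil (l : List Char) : pvSplitC l ≠ [] := by
  cases l with
  | nil => simp [pvSplitC]
  | cons c r =>
    simp only [pvSplitC]
    split
    · simp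
    · split <;> simp

lemma pvSplitC_cons' (l : List Char) : ∃ h t, pvSplitC l = h :: t := by
  cases hp : pvSplitC l with
  | nil => exact absurd hp (pvSplitC_ne_nil l)
  | cons a b => exact ⟨a, b, rfl⟩

lemma pvSplitOn_go_acc (sep : List Char) :
    ∀ fuel l cur acc, PySem.Chars.splitOn.go sep fuel l cur acc =
      acc.reverse ++ PySem.Chars.splitOn.go sep fuel l cur [] := by
  intro fuel
  induction fuel with
  | zero => intro l cur acc; simp [PySem.Chars.splitOn.go]
  | succ n ih =>
    intro l cur acc
    cases l with
    | nil => simp [PySem.Chars.splitOn.go]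
    | cons c t =>
      simp only [PySem.Chars.splitOn.go]
      split
      · rw [ih _ _ (cur.reverse :: acc), ih _ _ [cur.reverse]]
        simp
      · exact ih _ _ _

lemma pvSplitOn_go_dash :
    ∀ fuel l cur h t, l.length < fuel → pvSplitC l = h :: t →
      PySem.Chars.splitOn.go ['-'] fuel l cur [] = (cur.reverse ++ h) :: t := by
  intro fuel
  induction fuel with
  | zero => intro l cur h t hlen _; omega
  | succ n ih =>
    intro l cur h t hlen hsplit
    cases l with
    | nil =>
      simp only [pvSplitC] at hsplit
      obtain ⟨rfl, rfl⟩ : h = [] ∧ t = [] := by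
        injection hsplit with h1 h2; exact ⟨h1.symm, h2.symm⟩
      simp [PySem.Chars.splitOn.go]
    | cons c r =>
      by_cases hc : c = '-'
      · subst hc
        simp only [pvSplitC, if_pos rfl] at hsplit
        obtain ⟨rfl, rfl⟩ : h = [] ∧ t = pvSplitC r := by
          injection hsplit with h1 h2; exact ⟨h1.symm, h2.symm⟩
        simp only [PySem.Chars.splitOn.go]
        rw [if_pos (by simp [List.isPrefixOf])]
        obtain ⟨h', t', hsp⟩ := pvSplitC_cons' r
        have hdrop : List.drop ['-'].length ('-' :: r) = r := rfl
        rw [pvSplitOn_go_acc, hdrop, ih r [] h' t' (by simp at hlen ⊢; omega) hsp]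
        simp [hsp]
      · obtain ⟨h', t', hsp⟩ := pvSplitC_cons' r
        simp only [pvSplitC, if_neg hc, hsp] at hsplit
        obtain ⟨rfl, rfl⟩ : h = c :: h' ∧ t = t' := by
          injection hsplit with h1 h2; exact ⟨h1.symm, h2.symm⟩
        simp only [PySem.Chars.splitOn.go]
        rw [if_neg (by simp [List.isPrefixOf]; exact fun hco => absurd hco.symm hc),
          ih r (c :: cur) _ _ (by simp at hlen ⊢; omega) hsp]
        simp

lemma pvSplitOn_dash (l : List Char) :
    PySem.Chars.splitOn l ['-'] = pvSplitC l := by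
  obtain ⟨h', t', hsp⟩ := pvSplitC_cons' l
  unfold PySem.Chars.splitOn
  rw [pvSplitOn_go_dash (l.length + 1) l [] h' t' (by omega) hsp]
  simp [hsp]

-- join lemmas ----------------------------------------------------------------

lemma pvJoin_dash (h : List Char) (t : List (List Char)) :
    PySem.Chars.join ['-'] ((h :: t).map pvCap) =
      pvCap h ++ t.flatMap (fun p => '-' :: pvCap p) := by
  induction t generalizing h with
  | nil => simp [PySem.Chars.join, List.intercalate, List.intersperse]
  | cons p t ih =>
    have hstep : PySem.Chars.join ['-'] ((h :: p :: t).map pvCap)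
        = pvCap h ++ ['-'] ++ PySem.Chars.join ['-'] ((p :: t).map pvCap) := by
      simp [PySem.Chars.join, List.intercalate, List.intersperse]
    rw [hstep, ih]
    simp

lemma pvJoin_space_cons (x : List Char) (l : List (List Char)) :
    PySem.Chars.join [' '] (x :: l) =
      x ++ (if l = [] then [] else ' ' :: PySem.Chars.join [' '] l) := by
  cases l with
  | nil => simp [PySem.Chars.join, List.intercalate, List.intersperse]
  | cons y l => simp [PySem.Chars.join, List.intercalate, List.intersperse]

-- characters of pvSplitC parts come from the word ----------------------------

lemma pvMem_pvSplitC {w p : List Char} {c : Char}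
    (hp : p ∈ pvSplitC w) (hc : c ∈ p) : c ∈ w := by
  induction w generalizing p with
  | nil =>
    simp only [pvSplitC, List.mem_singleton] at hp
    subst hp; simp at hc
  | cons d r ih =>
    simp only [pvSplitC] at hp
    split at hp
    · rcases List.mem_cons.1 hp with rfl | hp'
      · simp at hc
      · exact List.mem_cons_of_mem _ (ih hp' hc)
    · obtain ⟨h', t', hq⟩ := pvSplitC_cons' r
      rw [hq] at hp
      rcases List.mem_cons.1 hp with rfl | hp'
      · rcases List.mem_cons.1 hc with rfl | hc'
        · exact List.mem_cons_self
        · exact List.mem_cons_of_mem _ (ih (by rw [hq]; exact List.mem_cons_self) hc')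
      · exact List.mem_cons_of_mem _ (ih (by rw [hq]; exact List.mem_cons_of_mem _ hp') hc)

-- pvInWord equals the capitalize-and-rejoin of A on a lower-fixed word -------

lemma pvInWord_split {w : List Char} (hl : ∀ c ∈ w, PySem.Chars.lowerChar c = c) :
    ∀ h t, pvSplitC w = h :: t →
      pvInWord w true = pvCap h ++ t.flatMap (fun p => '-' :: pvCap p) ∧
      pvInWord w false = h ++ t.flatMap (fun p => '-' :: pvCap p) := by
  induction w with
  | nil =>
    intro h t hsp
    simp only [pvSplitC] at hsp
    obtain ⟨rfl, rfl⟩ : h = [] ∧ t = [] := by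
      injection hsp with h1 h2; exact ⟨h1.symm, h2.symm⟩
    simp [pvInWord, pvCap]
  | cons c r ih =>
    intro h t hsp
    have hlr : ∀ x ∈ r, PySem.Chars.lowerChar x = x :=
      fun d hd => hl d (List.mem_cons_of_mem _ hd)
    obtain ⟨h', t', hq⟩ := pvSplitC_cons' r
    obtain ⟨ih1, ih2⟩ := ih hlr h' t' hq
    by_cases hdash : c = '-'
    · subst hdash
      simp only [pvSplitC, if_pos rfl, hq] at hsp
      obtain ⟨rfl, rfl⟩ : h = [] ∧ t = h' :: t' := by
        injection hsp with h1 h2; exact ⟨h1.symm, h2.symm⟩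
      constructor
      · simp only [pvInWord, if_pos rfl, ih1]
        simp [pvCap]
      · simp only [pvInWord, if_pos rfl, ih1]
        simp [pvCap]
    · simp only [pvSplitC, if_neg hdash, hq] at hsp
      obtain ⟨rfl, rfl⟩ : h = c :: h' ∧ t = t' := by
        injection hsp with h1 h2; exact ⟨h1.symm, h2.symm⟩
      have hlowh' : PySem.Chars.lower h' = h' := by
        refine pvLower_eq_self (fun d hd => hlr d ?_)
        exact pvMem_pvSplitC (by rw [hq]; exact List.mem_cons_self) hd
      constructor
      · simp only [pvInWord, if_neg hdash, ih2, pvCap, hlowh']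
        simp
      · simp only [pvInWord, if_neg hdash, ih2]
        simp

-- B's fold over a whitespace-free list ---------------------------------------

lemma pvFold_word {w : List Char} (hw : ∀ c ∈ w, PySem.Chars.isspace c = false) :
    ∀ out cap, w.foldl pvStep (out, false, true, cap) =
      (out ++ pvInWord w cap, false, true, pvCapEnd w cap) := by
  induction w with
  | nil => intro out cap; simp [pvInWord, pvCapEnd]
  | cons c r ih =>
    intro out cap
    have hc : PySem.Chars.isspace c = false := hw c List.mem_cons_self
    have hr : ∀ x ∈ r, PySem.Chars.isspace x = false :=
      fun d hd => hw d (List.mem_cons_of_mem _ hd)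
    by_cases hdash : c = '-'
    · subst hdash
      rw [List.foldl_cons]
      have hstep : pvStep (out, false, true, cap) '-' = (out ++ ['-'], false, true, true) := by
        simp [pvStep, hc]
      rw [hstep, ih hr]
      simp [pvInWord, pvCapEnd]
    · rw [List.foldl_cons]
      have hstep : pvStep (out, false, true, cap) c
          = (out ++ [if cap then PySem.Chars.upperChar c else c], false, true, false) := by
        simp [pvStep, hc, hdash]
      rw [hstep, ih hr]
      simp [pvInWord, pvCapEnd, hdash]

-- the main invariant: B's pass from a word-boundary state vs A's smart_capitalize

lemma pvMain : ∀ n (s : List Char), s.length ≤ n →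
    (∀ c ∈ s, PySem.Chars.lowerChar c = c) → ∀ (out : List Char) (b : Bool),
    (s.foldl pvStep (out, b, b, true)).1 =
      out ++ (if b = true ∧ PySem.Chars.split₀ s ≠ [] then [' '] else []) ++
        pvSmartCapitalize s := by
  intro n
  induction n with
  | zero =>
    intro s hlen _ out b
    have hs : s = [] := List.eq_nil_of_length_eq_zero (by omega)
    subst hs
    simp [pvSmartCapitalize, PySem.Chars.split₀, PySem.Chars.split₀.go,
      PySem.Chars.join, List.intercalate]
  | succ n ih =>
    intro s hlen hl out b
    cases s with
    | nil =>
      simp [pvSmartCapitalize, PySem.Chars.split₀, PySem.Chars.split₀.go,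
        PySem.Chars.join, List.intercalate]
    | cons c r =>
      have hlr : ∀ x ∈ r, PySem.Chars.lowerChar x = x :=
        fun d hd => hl d (List.mem_cons_of_mem _ hd)
      by_cases hc : PySem.Chars.isspace c = true
      · rw [List.foldl_cons]
        have hstep : pvStep (out, b, b, true) c = (out, b, b, true) := by
          cases b <;> simp [pvStep, hc]
        rw [hstep, ih r (by simp at hlen; omega) hlr out b]
        have hsc : pvSmartCapitalize (c :: r) = pvSmartCapitalize r := by
          unfold pvSmartCapitalize
          rw [pvSplit0_ws hc]
        rw [hsc, pvSplit0_ws hc]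
      · replace hc : PySem.Chars.isspace c = false := by simpa using hc
        set w' := r.takeWhile pvNWS with hw'def
        set r' := r.dropWhile pvNWS with hr'def
        have hwr : w' ++ r' = r := List.takeWhile_append_dropWhile
        have hw'ns : ∀ x ∈ w', PySem.Chars.isspace x = false := by
          intro x hx
          have := List.mem_takeWhile_imp hx
          simpa [pvNWS] using this
        have hsplit : PySem.Chars.split₀ (c :: r) =
            (c :: w') :: PySem.Chars.split₀ r' := pvSplit0_nws hc r
        have hlword : ∀ x ∈ c :: w', PySem.Chars.lowerChar x = x := by
          intro x hx
          rcases List.mem_cons.1 hx with rfl | hx'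
          · exact hl x List.mem_cons_self
          · exact hlr x (List.takeWhile_subset pvNWS hx')
        obtain ⟨hh, tt, hq⟩ := pvSplitC_cons' (c :: w')
        obtain ⟨hiw1, _⟩ := pvInWord_split hlword hh tt hq
        -- the capitalized word, as A computes it and as B emits it
        have hcapword : PySem.Chars.join ['-']
            ((PySem.Chars.splitOn (c :: w') ['-']).map pvCap) = pvInWord (c :: w') true := by
          rw [pvSplitOn_dash, hq, pvJoin_dash, hiw1]
        -- one uniform description of the first step of the fold
        have houtb : ∃ fo cc, pvStep (out, b, b, true) c
              = ((if b = true then out ++ [' '] else out) ++ fo, false, true, cc)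
            ∧ pvInWord (c :: w') true = fo ++ pvInWord w' cc := by
          by_cases hdash : c = '-'
          · subst hdash
            refine ⟨['-'], true, ?_, by simp [pvInWord]⟩
            cases b <;> simp [pvStep, hc]
          · refine ⟨[PySem.Chars.upperChar c], false, ?_, by simp [pvInWord, hdash]⟩
            cases b <;> simp [pvStep, hc, hdash]
        obtain ⟨fo, cc, hstep, hiw⟩ := houtb
        rw [List.foldl_cons, hstep]
        conv_lhs => rw [← hwr]
        rw [List.foldl_append, pvFold_word hw'ns]
        cases hr : r' with
        | nil =>
          simp only [List.foldl_nil]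
          unfold pvSmartCapitalize
          rw [hsplit, hr]
          have h0 : PySem.Chars.split₀ ([] : List Char) = [] := by
            simp [PySem.Chars.split₀, PySem.Chars.split₀.go]
          rw [h0, List.map_cons, pvJoin_space_cons, hcapword, hiw]
          cases b <;> simp [hsplit, hr, h0]
        | cons d r2 =>
          have hdw : List.dropWhile pvNWS r = d :: r2 := hr'def.symm.trans hr
          have hd : PySem.Chars.isspace d = true := by
            have h2 := List.head_dropWhile_not pvNWS (l := r) (by rw [hdw]; simp)
            have h3 : (List.dropWhile pvNWS r).head (by rw [hdw]; simp) = d := by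
              simp [hdw]
            rw [h3] at h2
            simpa [pvNWS] using h2
          have hlr2 : ∀ x ∈ r2, PySem.Chars.lowerChar x = x := by
            intro x hx
            refine hlr x ?_
            rw [← hwr, hr]
            exact List.mem_append_right _ (List.mem_cons_of_mem _ hx)
          have hlen2 : r2.length ≤ n := by
            have : r.length ≤ n := by simpa using Nat.le_of_succ_le_succ hlen
            rw [← hwr, hr] at this
            simp at this
            omega
          rw [List.foldl_cons]
          have hstep2 : ∀ O ce, pvStep (O, false, true, ce) d = (O, true, true, true) := by
            intro O ce
            simp [pvStep, hd]
          rw [hstep2, ih r2 hlen2 hlr2 _ true]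
          have hsp2 : PySem.Chars.split₀ r' = PySem.Chars.split₀ r2 := by
            rw [hr, pvSplit0_ws hd]
          unfold pvSmartCapitalize
          rw [hsplit, List.map_cons, pvJoin_space_cons, hcapword, hiw, hsp2]
          by_cases hnil : PySem.Chars.split₀ r2 = []
          · cases b <;> simp [hnil]
          · cases b <;> simp [hnil]

-- ===== VERDICT (by name: the statement is the Claim_ definition above) =====
theorem format_display_name_for_autocomplete_spec : Claim_equal_format_display_name_for_autocomplete := by
  intro raw hdom
  unfold Spec_format_display_name_for_autocomplete
  unfold format_display_name_for_autocomplete format_display_name_for_autocomplete_alt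
  set clean0 := PySem.Chars.lower raw.toList with hclean0
  have hfix : ∀ cl : List Char, (∀ c ∈ cl, PySem.Chars.lowerChar c = c) →
      String.mk (pvSmartCapitalize cl) = String.mk ((cl.foldl pvStep ([], false, false, true)).1) := by
    intro cl hl
    rw [pvMain cl.length cl le_rfl hl [] false]
    simp
  by_cases hin : PySem.Chars.isIn "mega-".toList clean0 = true
  · simp only [hin, if_pos]
    set clean := PySem.Chars.replace clean0 "mega-".toList "mega ".toList with hcl
    cases pvSpecialCases.get? (String.mk clean) with
    | some v => rfl
    | none =>
      refine hfix clean ?_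
      intro c hc
      rcases pvMem_replace hc with h | h
      · exact pvMem_lower h
      · fin_cases h <;> rfl
  · simp only [hin, Bool.false_eq_true, if_neg, if_false]
    cases pvSpecialCases.get? (String.mk clean0) with
    | some v => rfl
    | none => exact hfix clean0 (fun c hc => pvMem_lower hc)
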